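-- pv_equiv track=rewrite | github.com/mhennecke/adventofcode | 2015/11-corporate-policy/main.py | inc_c
-- ===== SOURCE A (Python) =====
-- def inc_c(s: list[str], i: int = 0) -> list[str]:
--     allowed = 'abcdefghjkmnpqrstuvwxyz'
--     c = s[-(i + 1)]
--     c_i = allowed.find(c)
--     if c_i == -1:
--         # looked for a char not in allow list: i, k or l
--         c_i_new = allowed.find(chr(ord(c) + 1))
--     else:
--         c_i_new = c_i + 1
--
--     if c_i_new >= len(allowed):
--         if i > len(s):
--             return None
--         else:
--             # overflow
--             inc_c(s, i + 1)
--
--     s[-(i + 1)] = allowed[c_i_new % len(allowed)]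
--     return s
-- ===== SOURCE B (Python) =====
-- # Single-pass iterative carry loop: walk the password leftwards over actual Python
-- # indices, incrementing as it goes and returning as soon as a position does not
-- # overflow.  Like A it mutates s in place and returns it (the in-place write order
-- # differs from A's recursion-unwind order; the final content is the same).
-- def inc_c(s: list[str], i: int = 0) -> list[str]:
--     allowed = 'abcdefghjkmnpqrstuvwxyz'
--     q = -(i + 1)
--     while True:
--         c = s[q]
--         k = allowed.find(c)
--         k = allowed.find(chr(ord(c) + 1)) if k == -1 else k + 1
--         s[q] = allowed[k % len(allowed)]
--         if k < len(allowed):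
--             return s
--         q -= 1
-- ===== Notes on version B (the rewrite author's own statement) =====
-- stated objective: simpler
-- what changed: Replaces A's recursion (recurse on overflow, assign each cell on the unwind) by a single flat while-loop that walks leftwards over actual indices, writing each incremented cell immediately and returning as soon as a position does not overflow.
import Mathlib
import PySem

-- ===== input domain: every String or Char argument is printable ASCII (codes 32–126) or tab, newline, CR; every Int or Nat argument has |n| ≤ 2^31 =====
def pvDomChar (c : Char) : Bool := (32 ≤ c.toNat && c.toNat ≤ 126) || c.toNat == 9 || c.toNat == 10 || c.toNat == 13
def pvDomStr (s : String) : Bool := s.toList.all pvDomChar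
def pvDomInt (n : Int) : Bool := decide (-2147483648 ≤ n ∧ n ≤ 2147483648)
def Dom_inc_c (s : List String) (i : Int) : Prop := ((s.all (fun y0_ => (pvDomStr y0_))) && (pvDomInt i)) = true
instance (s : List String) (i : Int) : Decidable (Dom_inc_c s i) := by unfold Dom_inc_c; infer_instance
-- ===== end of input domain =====

-- B replaces A's recursion (recurse on overflow, assign on the unwind) by a single flat
-- while-loop over actual indices, writing each incremented cell immediately and returning
-- as soon as a position does not overflow; same cost, different decomposition.
-- Both Pythons mutate s in place and return it; the equivalence proved is about the return
-- value (inside Pre_ B leaves s with the same final content, though its write ORDER differs).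

-- ===== PORT A =====
-- termination facts for the carry recursion / loop, cited by name in decreasing_by
lemma pvGetLt (s : List String) (t : Int) (c : String)
    (h : PySem.List.pyGet? s (-(t + 1)) = some c) : t < (s.length : Int) := by
  have hr : PySem.Raise.InRange s.length (-(t + 1)) := by
    by_contra hc
    rw [← PySem.List.pyGet?_eq_none_iff] at hc
    rw [hc] at h
    cases h
  obtain ⟨h1, h2⟩ := hr
  omega

lemma pvCarryDec (n : Nat) (t : Int) (h : t < (n : Int)) :
    ((n : Int) - (t + 1)).toNat < ((n : Int) - t).toNat := by omega

-- allowed = 'abcdefghjkmnpqrstuvwxyz'  (identical line in both Pythons)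
def pvAllowedL : List Char :=
  ['a','b','c','d','e','f','g','h','j','k','m','n','p','q','r','s','t','u','v','w','x','y','z']

-- the new-index computation (identical lines in A and B):
-- k = allowed.find(c); k = allowed.find(chr(ord(c)+1)) if k == -1 else k + 1
-- The '_ => 0' arm is Python's TypeError from ord() on a string of length ≠ 1 — excluded by Pre_inc_c.
def pvCiNew (c : String) : Int :=
  let ci := PySem.Chars.find pvAllowedL c.toList
  if ci = -1 then
    match c.toList with
    | [ch] => PySem.Chars.find pvAllowedL [Char.ofNat (ch.toNat + 1)]
    | _ => 0
  else ci + 1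

-- allowed[k] (as a 1-char str); "" is Python's IndexError, unreachable: k is always taken mod 23
def pvAllowedAt (k : Int) : String :=
  match PySem.List.pyGet? pvAllowedL k with
  | some ch => String.ofList [ch]
  | none => ""

-- literal port of A; 'none ⇒ s' is Python's IndexError (excluded by Pre_inc_c), and the
-- 'if (s.length:Int) < i then s' arm is Python's 'return None' (excluded by Pre_inc_c, in fact unreachable)
def inc_c (s : List String) (i : Int) : List String :=
  match h : PySem.List.pyGet? s (-(i + 1)) with
  | none => s
  | some c =>
    let ciNew := pvCiNew c
    let s' := if 23 ≤ ciNew then (if (s.length : Int) < i then s else inc_c s (i + 1)) else s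
    PySem.List.pySetD s' (-(i + 1)) (pvAllowedAt (PySem.Int.mod ciNew 23))
termination_by ((s.length : Int) - i).toNat
decreasing_by exact pvCarryDec s.length i (pvGetLt s i c h)

-- ===== PORT B =====
-- the 'while True' body of Source B: read s[q], compute k, write s[q] = allowed[k % 23],
-- return on k < 23, else continue at q - 1 on the UPDATED list.
-- 'none ⇒ u' is Python's IndexError on the read (excluded by Pre_inc_c).
def pvLoopB (u : List String) (q : Int) : List String :=
  match h : PySem.List.pyGet? u q with
  | none => u
  | some c =>
    let k := pvCiNew c
    let u' := PySem.List.pySetD u q (pvAllowedAt (PySem.Int.mod k 23))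
    if k < 23 then u' else pvLoopB u' (q - 1)
termination_by (q + u.length + 1).toNat
decreasing_by
  have hr : PySem.Raise.InRange u.length q := by
    by_contra hc
    rw [← PySem.List.pyGet?_eq_none_iff] at hc
    rw [hc] at h
    cases h
  obtain ⟨h1, -⟩ := hr
  simp only [PySem.List.length_pySetD]
  omega

-- literal port of B:  q = -(i + 1), then the loop
def inc_c_alt (s : List String) (i : Int) : List String :=
  pvLoopB s (-(i + 1))

-- ===== PRECONDITION & SPEC =====
-- the stopping character of the carry run: not 'z', and not Python's ord() TypeError
-- (ord is only reached when allowed.find(c) == -1, and needs a 1-character string)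
def pvStopOk (oc : Option String) : Bool :=
  match oc with
  | some c => c != "z" && (PySem.Chars.find pvAllowedL c.toList != -1 || c.toList.length == 1)
  | none => false

-- Pre_ = exactly the inputs on which A returns: a run of "z" cells starting at position i
-- (Python index -(k+1)) ends, within bounds, at a cell whose string is not "z" and does not
-- make ord() raise.  Outside Pre_, A raises IndexError or TypeError.
def Pre_inc_c (s : List String) (i : Int) : Prop :=
  ∃ j ∈ PySem.List.pyRange i (i + 2 * (s.length : Int) + 1) 1,
    (∀ k ∈ PySem.List.pyRange i j 1, PySem.List.pyGet? s (-(k + 1)) = some "z") ∧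
    pvStopOk (PySem.List.pyGet? s (-(j + 1))) = true
instance (s : List String) (i : Int) : Decidable (Pre_inc_c s i) := by unfold Pre_inc_c; infer_instance

def pvWitness_inc_c : List String × Int := (["a", "z"], 0)

def Spec_inc_c (s : List String) (i : Int) (out : List String) : Prop := out = inc_c_alt s i
instance (s : List String) (i : Int) (out : List String) : Decidable (Spec_inc_c s i out) := by unfold Spec_inc_c; infer_instance

-- ===== CLAIM (what is proved, stated in full; the proofs are below) =====
def Claim_equal_inc_c : Prop := ∀ (s : List String) (i : Int), Dom_inc_c s i → Pre_inc_c s i → Spec_inc_c s i (inc_c s i)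

-- ===== LEMMAS AND PROOFS =====

lemma inRange_of_get {s : List String} {t : Int} {c : String}
    (h : PySem.List.pyGet? s t = some c) : -(s.length : Int) ≤ t ∧ t < (s.length : Int) := by
  have hr : PySem.Raise.InRange s.length t := by
    by_contra hc
    rw [← PySem.List.pyGet?_eq_none_iff] at hc
    rw [hc] at h
    cases h
  exact hr

-- reading an index whose physical position differs from the written one sees the old list
lemma get_setD_ne {xs : List String} {p q : Int} {v : String}
    (h : PySem.List.pyIdx? xs.length q ≠ PySem.List.pyIdx? xs.length p) :
    PySem.List.pyGet? (PySem.List.pySetD xs p v) q = PySem.List.pyGet? xs q := by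
  unfold PySem.List.pySetD PySem.List.pySet? PySem.List.pyGet?
  cases hp : PySem.List.pyIdx? xs.length p with
  | none => simp
  | some kp =>
      simp only [Option.map_some, Option.getD_some, List.length_set]
      cases hq : PySem.List.pyIdx? xs.length q with
      | none => simp
      | some kq =>
          have hne : kq ≠ kp := by
            intro he; rw [hp, hq, he] at h; exact h rfl
          exact List.getElem?_set_ne (Ne.symm hne)

-- writes at physically different positions commute
lemma setD_comm_ne {xs : List String} {p q : Int} {v w : String}
    (h : PySem.List.pyIdx? xs.length q ≠ PySem.List.pyIdx? xs.length p) :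
    PySem.List.pySetD (PySem.List.pySetD xs p v) q w
      = PySem.List.pySetD (PySem.List.pySetD xs q w) p v := by
  unfold PySem.List.pySetD PySem.List.pySet?
  cases hp : PySem.List.pyIdx? xs.length p with
  | none =>
      cases hq : PySem.List.pyIdx? xs.length q with
      | none => simp [hp, hq]
      | some kq => simp [hp, hq, List.length_set]
  | some kp =>
      cases hq : PySem.List.pyIdx? xs.length q with
      | none => simp [hp, hq, List.length_set]
      | some kq =>
          have hne : kp ≠ kq := by
            intro he; rw [hp, hq, he] at h; exact h rfl
          simp only [hp, hq, Option.map_some, Option.getD_some, List.length_set]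
          rw [List.set_comm v w hne]

-- Python's negative indexing wraps: s[t] = s[t + n] for -n ≤ t < 0
lemma get_wrap (s : List String) (t : Int)
    (h1 : -(s.length : Int) ≤ t) (h2 : t < 0) :
    PySem.List.pyGet? s (t + s.length) = PySem.List.pyGet? s t := by
  unfold PySem.List.pyGet?
  have : PySem.List.pyIdx? s.length (t + s.length) = PySem.List.pyIdx? s.length t := by
    unfold PySem.List.pyIdx?
    split_ifs <;> first | omega | (exact congrArg some (by omega))
  rw [this]

-- two in-range indices less than a length apart occupy different physical positions
lemma idx_inj {n : Nat} {a b : Int}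
    (ha : -(n : Int) ≤ a ∧ a < n) (hb : -(n : Int) ≤ b ∧ b < n)
    (hne : a ≠ b) (hfar : a - b < n ∧ b - a < n) :
    PySem.List.pyIdx? n a ≠ PySem.List.pyIdx? n b := by
  intro h
  unfold PySem.List.pyIdx? at h
  split_ifs at h <;> first | omega | (simp only [Option.some.injEq] at h; omega)

lemma ciNew_z : pvCiNew "z" = 23 := by decide

lemma allowedAt_zero : pvAllowedAt (PySem.Int.mod 23 23) = "a" := by decide

lemma stopOk_elim {oc : Option String} (h : pvStopOk oc = true) :
    ∃ c, oc = some c ∧ c ≠ "z" ∧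
      (PySem.Chars.find pvAllowedL c.toList ≠ -1 ∨ c.toList.length = 1) := by
  cases oc with
  | none => simp [pvStopOk] at h
  | some c =>
      refine ⟨c, rfl, ?_⟩
      simpa [pvStopOk] using h

lemma prefix_singleton {α : Type} {l : List α} {x : α} (h : l <+: [x]) : l = [] ∨ l = [x] := by
  rcases h with ⟨t, ht⟩
  cases l with
  | nil => exact Or.inl rfl
  | cons a r =>
      right
      simp at ht
      obtain ⟨h1, h2, _⟩ := ht
      simp [h1, h2]

lemma findA_le_22 (l : List Char) (hne : l ≠ []) : PySem.Chars.find pvAllowedL l ≤ 22 := by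
  by_contra hgt
  have hle : PySem.Chars.find pvAllowedL l ≤ 23 := by
    have := PySem.Chars.find_le_length pvAllowedL l
    simpa [pvAllowedL] using this
  have h23 : PySem.Chars.find pvAllowedL l = 23 := by omega
  have hsp := (PySem.Chars.find_spec (s := pvAllowedL) (sub := l) (by omega)).1
  rw [h23] at hsp
  have hd : List.drop (Int.toNat 23) pvAllowedL = ([] : List Char) := by decide
  rw [hd] at hsp
  exact hne (List.prefix_nil.mp hsp)

lemma findA_le_21 (l : List Char) (hne : l ≠ ['z']) : PySem.Chars.find pvAllowedL l ≤ 21 := by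
  by_contra hgt
  have hne' : l ≠ [] := by
    intro he
    rw [he] at hgt
    rw [PySem.Chars.find_nil] at hgt
    omega
  have h22 : PySem.Chars.find pvAllowedL l = 22 := by
    have := findA_le_22 l hne'
    omega
  have hsp := (PySem.Chars.find_spec (s := pvAllowedL) (sub := l) (by omega)).1
  rw [h22] at hsp
  have hd : List.drop (Int.toNat 22) pvAllowedL = ['z'] := by decide
  rw [hd] at hsp
  rcases prefix_singleton hsp with h | h
  · exact hne' h
  · exact hne h

lemma ciNew_lt (c : String) (hz : c ≠ "z")
    (hok : PySem.Chars.find pvAllowedL c.toList ≠ -1 ∨ c.toList.length = 1) :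
    pvCiNew c < 23 := by
  have hlz : c.toList ≠ ['z'] := by
    intro he
    apply hz
    rw [← String.ofList_toList (s := c), he]
  unfold pvCiNew
  by_cases hf : PySem.Chars.find pvAllowedL c.toList = -1
  · rw [if_pos hf]
    rcases hok with h1 | h1
    · exact absurd hf h1
    · obtain ⟨ch, hm⟩ := List.length_eq_one_iff.mp h1
      rw [hm]
      show PySem.Chars.find pvAllowedL [Char.ofNat (ch.toNat + 1)] < 23
      have := findA_le_22 [Char.ofNat (ch.toNat + 1)] (by simp)
      omega
  · rw [if_neg hf]
    have := findA_le_21 c.toList hlz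
    omega

-- a write at a physically untouched position p commutes past the whole carry loop
lemma loopB_set_comm :
    ∀ (d : Nat) (u : List String) (t p : Int) (v : String),
    (∀ k : Int, t ≤ k → k < t + d → PySem.List.pyGet? u (-(k + 1)) = some "z") →
    (∃ c, PySem.List.pyGet? u (-(t + d + 1)) = some c ∧ pvCiNew c < 23) →
    (∀ k k' : Int, t ≤ k → k ≤ t + d → t ≤ k' → k' ≤ t + d → k ≠ k' →
       PySem.List.pyIdx? u.length (-(k + 1)) ≠ PySem.List.pyIdx? u.length (-(k' + 1))) →
    (∀ k : Int, t ≤ k → k ≤ t + d → PySem.List.pyIdx? u.length (-(k + 1)) ≠ PySem.List.pyIdx? u.length p) →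
    pvLoopB (PySem.List.pySetD u p v) (-(t + 1)) = PySem.List.pySetD (pvLoopB u (-(t + 1))) p v := by
  intro d
  induction d with
  | zero =>
      intro u t p v _ hstop _ hp
      obtain ⟨c, hget, hlt⟩ := hstop
      have hget' : PySem.List.pyGet? u (-(t + 1)) = some c := by
        have : t + (0 : Nat) + 1 = t + 1 := by push_cast; ring
        rw [this] at hget; exact hget
      have hread : PySem.List.pyGet? (PySem.List.pySetD u p v) (-(t + 1)) = some c := by
        rw [get_setD_ne (hp t le_rfl (by simp)), hget']
      rw [pvLoopB, hread, pvLoopB, hget']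
      simp only [if_pos hlt]
      exact setD_comm_ne (hp t le_rfl (by simp))
  | succ d ih =>
      intro u t p v hrun hstop hpair hp
      have hd1 : (((d : Nat) + 1 : Nat) : Int) = (d : Int) + 1 := by push_cast; ring
      have hz : PySem.List.pyGet? u (-(t + 1)) = some "z" := hrun t le_rfl (by omega)
      have hpt : PySem.List.pyIdx? u.length (-(t + 1)) ≠ PySem.List.pyIdx? u.length p :=
        hp t le_rfl (by omega)
      have hread : PySem.List.pyGet? (PySem.List.pySetD u p v) (-(t + 1)) = some "z" := by
        rw [get_setD_ne hpt, hz]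
      rw [pvLoopB, hread, pvLoopB, hz]
      simp only [ciNew_z, allowedAt_zero]
      have hstep : -(t + 1) - 1 = -(t + 1 + 1) := by ring
      rw [hstep]
      -- commute the two writes on the left
      rw [setD_comm_ne hpt]
      -- apply the IH on the updated list u' = u with cell t set to "a"
      have hlen : (PySem.List.pySetD u (-(t + 1)) "a").length = u.length :=
        PySem.List.length_pySetD u (-(t + 1)) "a"
      have hdist_t : ∀ k : Int, t + 1 ≤ k → k ≤ t + 1 + d →
          PySem.List.pyIdx? u.length (-(k + 1)) ≠ PySem.List.pyIdx? u.length (-(t + 1)) := by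
        intro k h1 h2
        exact hpair k t (by omega) (by omega) le_rfl (by omega) (by omega)
      have hrun' : ∀ k : Int, t + 1 ≤ k → k < t + 1 + d →
          PySem.List.pyGet? (PySem.List.pySetD u (-(t + 1)) "a") (-(k + 1)) = some "z" := by
        intro k h1 h2
        rw [get_setD_ne (hdist_t k h1 (by omega))]
        exact hrun k (by omega) (by omega)
      have hstop' : ∃ c, PySem.List.pyGet? (PySem.List.pySetD u (-(t + 1)) "a") (-(t + 1 + d + 1)) = some c ∧ pvCiNew c < 23 := by
        obtain ⟨c, hget, hlt⟩ := hstop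
        refine ⟨c, ?_, hlt⟩
        rw [get_setD_ne (hdist_t (t + 1 + d) (by omega) (by omega))]
        have : t + ((d : Nat) + 1 : Nat) + 1 = t + 1 + d + 1 := by push_cast; ring
        rw [this] at hget; exact hget
      have hpair' : ∀ k k' : Int, t + 1 ≤ k → k ≤ t + 1 + d → t + 1 ≤ k' → k' ≤ t + 1 + d → k ≠ k' →
          PySem.List.pyIdx? (PySem.List.pySetD u (-(t + 1)) "a").length (-(k + 1))
            ≠ PySem.List.pyIdx? (PySem.List.pySetD u (-(t + 1)) "a").length (-(k' + 1)) := by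
        intro k k' h1 h2 h3 h4 h5
        rw [hlen]
        exact hpair k k' (by omega) (by omega) (by omega) (by omega) h5
      have hp' : ∀ k : Int, t + 1 ≤ k → k ≤ t + 1 + d →
          PySem.List.pyIdx? (PySem.List.pySetD u (-(t + 1)) "a").length (-(k + 1))
            ≠ PySem.List.pyIdx? (PySem.List.pySetD u (-(t + 1)) "a").length p := by
        intro k h1 h2
        rw [hlen]
        exact hp k (by omega) (by omega)
      exact ih (PySem.List.pySetD u (-(t + 1)) "a") (t + 1) p v hrun' hstop' hpair' hp'

-- the two programs agree along the carry run
lemma pvMain (s : List String) (j : Int) (c : String)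
    (hget : PySem.List.pyGet? s (-(j + 1)) = some c) (hlt : pvCiNew c < 23) :
    ∀ (d : Nat) (t : Int), t + d = j →
    (∀ k : Int, t ≤ k → k < j → PySem.List.pyGet? s (-(k + 1)) = some "z") →
    (∀ k k' : Int, t ≤ k → k ≤ j → t ≤ k' → k' ≤ j → k ≠ k' →
       PySem.List.pyIdx? s.length (-(k + 1)) ≠ PySem.List.pyIdx? s.length (-(k' + 1))) →
    inc_c s t = pvLoopB s (-(t + 1)) := by
  intro d
  induction d with
  | zero =>
      intro t htd _ _
      have htj : t = j := by omega
      subst htj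
      rw [inc_c, hget, pvLoopB, hget]
      simp only [if_neg (not_le.mpr hlt), if_pos hlt]
  | succ d ih =>
      intro t htd hrun hpair
      have htj : t < j := by omega
      have hz : PySem.List.pyGet? s (-(t + 1)) = some "z" := hrun t le_rfl htj
      have hn : t < (s.length : Int) := pvGetLt s t "z" hz
      have hnlt : ¬ ((s.length : Int) < t) := by omega
      -- A side: recursion then write "a" at t
      rw [inc_c, hz]
      simp only [ciNew_z, if_pos (le_refl (23 : Int)), if_neg hnlt, allowedAt_zero]
      -- B side: write "a" at t, then the loop from t+1
      rw [pvLoopB, hz]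
      simp only [ciNew_z, allowedAt_zero]
      rw [if_neg (lt_irrefl (23 : Int))]
      have hstep : -(t + 1) - 1 = -(t + 1 + 1) := by ring
      rw [hstep]
      -- commute the write past the rest of the loop
      have hcomm := loopB_set_comm d s (t + 1) (-(t + 1)) "a"
        (by intro k h1 h2; exact hrun k (by omega) (by omega))
        (by
          refine ⟨c, ?_, hlt⟩
          have : t + 1 + (d : Int) + 1 = j + 1 := by omega
          rw [this]
          exact hget)
        (by
          intro k k' h1 h2 h3 h4 h5
          exact hpair k k' (by omega) (by omega) (by omega) (by omega) h5)
        (by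
          intro k h1 h2
          exact hpair k t (by omega) (by omega) (by omega) (by omega) (by omega))
      rw [hcomm]
      rw [← ih (t + 1) (by omega)
        (by intro k h1 h2; exact hrun k (by omega) h2)
        (by intro k k' h1 h2 h3 h4 h5; exact hpair k k' (by omega) h2 (by omega) h4 h5)]

-- ===== VERDICT (by name: the statement is the Claim_ definition above) =====
theorem inc_c_spec : Claim_equal_inc_c := by
  intro s i _ hpre
  unfold Spec_inc_c inc_c_alt
  obtain ⟨j, hjmem, hrun, hstop⟩ := hpre
  obtain ⟨c, hget, hz, hok⟩ := stopOk_elim hstop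
  have hij : i ≤ j := (PySem.List.mem_pyRange_one.mp hjmem).1
  have hrun' : ∀ k : Int, i ≤ k → k < j → PySem.List.pyGet? s (-(k + 1)) = some "z" := by
    intro k h1 h2
    exact hrun k (PySem.List.mem_pyRange_one.mpr ⟨h1, h2⟩)
  have hlt : pvCiNew c < 23 := ciNew_lt c hz hok
  -- bounds: every visited offset k ∈ [i, j] satisfies -n ≤ k ≤ n - 1
  have hbound : ∀ k : Int, i ≤ k → k ≤ j → -(s.length : Int) ≤ k ∧ k ≤ (s.length : Int) - 1 := by
    intro k h1 h2
    rcases eq_or_lt_of_le h2 with he | hlt2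
    · subst he
      have := inRange_of_get hget
      omega
    · have := inRange_of_get (hrun' k h1 hlt2)
      omega
  -- no wraparound: the run is shorter than the list
  have hnowrap : j - i < (s.length : Int) := by
    by_contra hw
    have hn1 : 1 ≤ (s.length : Int) := by
      have := inRange_of_get hget
      omega
    have hj0 : 0 ≤ j := by
      have := (hbound i le_rfl hij).1
      omega
    have hjb := inRange_of_get hget
    have hwrap := get_wrap s (-(j + 1)) (by omega) (by omega)
    have hk0 : -(j + 1) + (s.length : Int) = -((j - s.length) + 1) := by ring
    rw [hk0, hget] at hwrap
    have := hrun' (j - s.length) (by omega) (by omega)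
    rw [this] at hwrap
    exact hz (by injection hwrap with h; exact h.symm)
  -- pairwise distinct physical positions along the run
  have hpair : ∀ k k' : Int, i ≤ k → k ≤ j → i ≤ k' → k' ≤ j → k ≠ k' →
      PySem.List.pyIdx? s.length (-(k + 1)) ≠ PySem.List.pyIdx? s.length (-(k' + 1)) := by
    intro k k' h1 h2 h3 h4 h5
    have hb1 := hbound k h1 h2
    have hb2 := hbound k' h3 h4
    exact idx_inj (by omega) (by omega) (by omega) (by omega)
  exact pvMain s j c hget hlt (j - i).toNat i (by omega) hrun' hpair
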